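-- pv_equiv track=rewrite | github.com/ad-bcr-repertoire/codes | 3. merge analysis.py | sort_components_by_its_size
-- ===== SOURCE A (Python) =====
-- def sort_components_by_its_size(compList):
--     compSet = {}
--     for comp in compList:
--         compSize = len(comp)
--         try:
--             compSet[compSize].append(comp)
--         except KeyError:
--             compSet[compSize] = [comp]
--     compSizeKeyList = list(compSet.keys())
--     compSizeKeyList.sort(reverse=True)
--     sortedCompList = []
--     for compSizeKey in compSizeKeyList:
--         sortedCompList += compSet[compSizeKey]
--     return sortedCompList
-- ===== SOURCE B (Python) =====
-- def sort_components_by_its_size(compList):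
--     return sorted(compList, key=len, reverse=True)
-- ===== Notes on version B (the rewrite author's own statement) =====
-- stated objective: simpler
-- what changed: Replaces the size-keyed bucket dict, key-list sort and concatenation loop with a single stable sort by length descending, whose tie stability reproduces the insertion order within each size group.
import Mathlib
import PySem

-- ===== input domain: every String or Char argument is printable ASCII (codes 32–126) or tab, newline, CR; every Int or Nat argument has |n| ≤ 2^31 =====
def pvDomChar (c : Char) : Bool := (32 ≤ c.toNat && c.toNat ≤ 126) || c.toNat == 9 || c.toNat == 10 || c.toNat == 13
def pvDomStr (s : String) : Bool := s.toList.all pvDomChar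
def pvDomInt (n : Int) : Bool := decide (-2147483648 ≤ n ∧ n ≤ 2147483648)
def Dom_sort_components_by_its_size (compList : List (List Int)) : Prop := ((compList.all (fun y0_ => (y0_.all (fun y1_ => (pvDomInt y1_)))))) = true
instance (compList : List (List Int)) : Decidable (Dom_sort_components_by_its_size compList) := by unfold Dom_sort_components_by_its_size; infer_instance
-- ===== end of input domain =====

-- B replaces A's size-keyed bucket dict + key sort + concatenation loop with one stable
-- sort by length descending (objective: simpler); proved equal on all inputs.


-- ===== PORT A =====
-- dict building: 'try: compSet[size].append(comp) except KeyError: compSet[size] = [comp]'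
-- is exactly Dict.modify size [] (· ++ [comp]); keys list sorted reverse=True; then '+=' concatenation.
def sort_components_by_its_size (compList : List (List Int)) : List (List Int) :=
  let compSet : PySem.Dict Int (List (List Int)) :=
    compList.foldl (fun d comp => d.modify (PySem.List.len comp) [] (fun v => v ++ [comp])) PySem.Dict.empty
  let compSizeKeyList : List Int := PySem.List.sorted compSet.keys (fun k => k) true
  compSizeKeyList.foldl (fun acc k => acc ++ compSet.getD k []) []

-- ===== PORT B =====
-- Source B: return sorted(compList, key=len, reverse=True)
def sort_components_by_its_size_alt (compList : List (List Int)) : List (List Int) :=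
  PySem.List.sorted compList (fun comp => PySem.List.len comp) true

-- ===== PRECONDITION & SPEC =====
def Spec_sort_components_by_its_size (compList : List (List Int)) (out : List (List Int)) : Prop := out = sort_components_by_its_size_alt compList
instance (compList : List (List Int)) (out : List (List Int)) : Decidable (Spec_sort_components_by_its_size compList out) := by unfold Spec_sort_components_by_its_size; infer_instance

-- ===== CLAIM (what is proved, stated in full; the proofs are below) =====
def Claim_equal_sort_components_by_its_size : Prop := ∀ (compList : List (List Int)), Dom_sort_components_by_its_size compList → Spec_sort_components_by_its_size compList (sort_components_by_its_size compList)

-- ===== LEMMAS AND PROOFS =====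

-- insertBy skips over a prefix no element of which triggers `before`.
theorem insertBy_append_not_before {α : Type} (before : α → α → Bool) (x : α)
    (l t : List α) (h : ∀ y ∈ l, before x y = false) :
    PySem.List.insertBy before x (l ++ t) = l ++ PySem.List.insertBy before x t := by
  induction l with
  | nil => simp
  | cons y ys ih =>
      simp only [List.cons_append, PySem.List.insertBy, h y (by simp)]
      simp only [List.mem_cons] at h
      rw [ih (fun z hz => h z (Or.inr hz))]
      simp

-- insertBy puts x in front when the head (if any) triggers `before`.
theorem insertBy_cons_of_before {α : Type} (before : α → α → Bool) (x : α)
    (l : List α) (h : ∀ y ∈ l, before x y = true) :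
    PySem.List.insertBy before x l = x :: l := by
  cases l with
  | nil => rfl
  | cons y ys => simp [PySem.List.insertBy, h y (by simp)]

-- Inserting x into a bucket decomposition: x joins (or creates) the bucket of its key,
-- and on the key side the new key is inserted into the strictly descending key list.
theorem flat_insert {α : Type} (key : α → Int) (x : α) :
    ∀ (ks : List Int) (g : Int → List α),
    ks.Pairwise (fun a b => b < a) →
    (∀ k ∈ ks, ∀ y ∈ g k, key y = k) →
    (key x ∉ ks → g (key x) = []) →
    PySem.List.insertBy (fun a b => decide (key b < key a)) x (ks.flatMap g) =
      (if key x ∈ ks then ks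
       else PySem.List.insertBy (fun a b : Int => decide (b < a)) (key x) ks).flatMap
        (fun k => g k ++ if k = key x then [x] else []) := by
  intro ks
  induction ks with
  | nil =>
      intro g _ _ hc
      simp [PySem.List.insertBy, hc (by simp)]
  | cons k ks' ih =>
      intro g hpw hg hc
      have hpw' : ks'.Pairwise (fun a b => b < a) := hpw.tail
      have hd : ∀ b ∈ ks', b < k := fun b hb => (List.pairwise_cons.mp hpw).1 b hb
      by_cases hkc : k = key x
      · -- x appends to the bucket of k
        have hmem : key x ∈ k :: ks' := by simp [← hkc]
        rw [if_pos hmem]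
        have h1 : List.flatMap g (k :: ks') = g k ++ List.flatMap g ks' := by simp
        rw [h1, insertBy_append_not_before _ _ _ _
          (fun y hy => by simp [hg k (by simp) y hy, hkc])]
        rw [insertBy_cons_of_before _ _ _
          (fun y hy => by
            rcases List.mem_flatMap.mp hy with ⟨k', hk', hy'⟩
            have hky := hg k' (by simp [hk']) y hy'
            have := hd k' hk'
            simp [hky, ← hkc, this])]
        have h2 : ∀ k' ∈ ks', (g k' ++ if k' = key x then [x] else []) = g k' := by
          intro k' hk'
          have : k' ≠ key x := hkc ▸ ne_of_lt (hd k' hk')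
          simp [this]
        rw [List.flatMap_cons, List.flatMap_congr h2, hkc]
        simp
      · by_cases hlt : key x < k
        · -- x's key is smaller than k: skip bucket g k, recurse
          have hnotin' : key x ∉ ks' → key x ∉ k :: ks' := by
            intro h; simp [Ne.symm hkc, h]
          have hskip : PySem.List.insertBy (fun a b => decide (key b < key a)) x
              (List.flatMap g (k :: ks')) =
              g k ++ PySem.List.insertBy (fun a b => decide (key b < key a)) x
                (List.flatMap g ks') := by
            rw [List.flatMap_cons, insertBy_append_not_before _ _ _ _
              (fun y hy => by simp [hg k (by simp) y hy, not_lt_of_gt hlt])]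
          rw [hskip, ih g hpw' (fun k' hk' => hg k' (by simp [hk']))
            (fun h => hc (hnotin' h))]
          by_cases hmem' : key x ∈ ks'
          · rw [if_pos hmem', if_pos (by simp [hmem'])]
            simp [hkc]
          · rw [if_neg hmem', if_neg (fun h => by
              rcases List.mem_cons.mp h with h | h
              · exact hkc h.symm
              · exact hmem' h)]
            have : PySem.List.insertBy (fun a b : Int => decide (b < a)) (key x) (k :: ks') =
                k :: PySem.List.insertBy (fun a b : Int => decide (b < a)) (key x) ks' := by
              simp [PySem.List.insertBy, not_lt_of_gt hlt]
            rw [this, List.flatMap_cons]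
            simp [hkc]
        · -- x's key is larger than every key: new front bucket [x]
          have hklt : k < key x := lt_of_le_of_ne (not_lt.mp hlt) hkc
          have hnot : key x ∉ k :: ks' := by
            simp only [List.mem_cons, not_or]
            exact ⟨Ne.symm hkc, fun h => absurd (hd _ h) (not_lt_of_gt hklt)⟩
          rw [if_neg hnot]
          have hfront : PySem.List.insertBy (fun a b : Int => decide (b < a)) (key x) (k :: ks') =
              key x :: k :: ks' := by
            simp [PySem.List.insertBy, hklt]
          rw [hfront, insertBy_cons_of_before _ _ _
            (fun y hy => by
              rcases List.mem_flatMap.mp hy with ⟨k', hk', hy'⟩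
              have hk'le : k' ≤ k := by
                rcases List.mem_cons.mp hk' with h | h
                · exact le_of_eq h
                · exact le_of_lt (hd k' h)
              have := hg k' hk' y hy'
              simp [this]
              omega)]
          have h2 : List.flatMap (fun k' => g k' ++ if k' = key x then [x] else []) (k :: ks')
              = List.flatMap g (k :: ks') :=
            List.flatMap_congr (fun k' hk' => by
              have : k' ≠ key x := fun h => hnot (h ▸ hk')
              simp [this])
          have hrhs : List.flatMap (fun k' => g k' ++ if k' = key x then [x] else [])
              (key x :: k :: ks') = x :: List.flatMap g (k :: ks') := by
            rw [List.flatMap_cons, h2]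
            simp [hc hnot]
          rw [hrhs]

-- Stable descending sort = buckets by key, keys sorted descending, original order inside.
theorem bucket_sorted {α : Type} (key : α → Int) (xs : List α) :
    PySem.List.sorted xs key true =
      (PySem.List.sorted (PySem.Set.ofList (xs.map key)) (fun k => k) true).flatMap
        (fun k => xs.filter (fun c => key c == k)) := by
  induction xs using List.reverseRecOn with
  | nil => rfl
  | append_singleton xs x ih =>
      have hL : PySem.List.sorted (xs ++ [x]) key true =
          PySem.List.insertBy (fun a b => decide (key b < key a)) x
            (PySem.List.sorted xs key true) := by
        rw [PySem.List.sorted_rev_eq_foldl_insertBy, PySem.List.sorted_rev_eq_foldl_insertBy,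
          List.foldl_append]
        rfl
      set S := PySem.Set.ofList (xs.map key) with hS
      set ks := PySem.List.sorted S (fun k => k) true with hks
      have hpw : ks.Pairwise (fun a b : Int => b < a) := by
        have h1 : ks.Pairwise (fun a b : Int => b ≤ a) :=
          PySem.List.sorted_pairwise_rev S (fun k => k)
        have h2 : ks.Nodup := ((PySem.List.sorted_perm S (fun k => k) true)).nodup_iff.mpr
          (PySem.Set.nodup_ofList _)
        exact (h1.and h2).imp (fun h => lt_of_le_of_ne h.1 (Ne.symm h.2))
      have hg : ∀ k ∈ ks, ∀ y ∈ xs.filter (fun c => key c == k), key y = k := by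
        intro k _ y hy
        exact by simpa using (List.of_mem_filter hy)
      have hmemks : ∀ c : Int, c ∈ ks ↔ c ∈ xs.map key := by
        intro c
        rw [hks, PySem.List.mem_sorted, hS, PySem.Set.mem_ofList]
      have hc : key x ∉ ks → xs.filter (fun c => key c == key x) = [] := by
        intro h
        rw [List.filter_eq_nil_iff]
        intro a ha hb
        exact h ((hmemks (key x)).mpr (by
          have : key a = key x := by simpa using hb
          exact this ▸ List.mem_map_of_mem ha))
      rw [hL, ih, flat_insert key x ks _ hpw hg hc]
      -- right-hand side: new key set and new buckets
      have hSr : PySem.Set.ofList ((xs ++ [x]).map key) = PySem.Set.add S (key x) := by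
        rw [List.map_append, PySem.Set.ofList_eq_foldl, List.foldl_append,
          ← PySem.Set.ofList_eq_foldl, hS]
        rfl
      have hfil : ∀ k : Int, (xs ++ [x]).filter (fun c => key c == k) =
          xs.filter (fun c => key c == k) ++ if k = key x then [x] else [] := by
        intro k
        rw [List.filter_append]
        congr 1
        by_cases h : k = key x
        · subst h; simp
        · have hb : (key x == k) = false := by simpa using Ne.symm h
          simp [List.filter, hb, h]
      rw [hSr]
      by_cases hmem : key x ∈ ks
      · have hxS : key x ∈ S := by
          rw [hS, PySem.Set.mem_ofList]; exact (hmemks _).mp hmem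
        have hcont : PySem.Set.contains S (key x) = true :=
          (PySem.Set.contains_iff S (key x)).mpr hxS
        have : PySem.Set.add S (key x) = S := by
          simp [PySem.Set.add, hxS]
        rw [this, if_pos hmem, ← hks]
        exact (List.flatMap_congr (fun k _ => (hfil k).symm))
      · have hxS : key x ∉ S := by
          rw [hS, PySem.Set.mem_ofList]
          exact fun h => hmem ((hmemks _).mpr h)
        have hcont : PySem.Set.contains S (key x) = false :=
          Bool.eq_false_iff.mpr (fun h => hxS ((PySem.Set.contains_iff S (key x)).mp h))
        have hadd : PySem.Set.add S (key x) = S ++ [key x] := by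
          simp [PySem.Set.add, hxS]
        have hsrt : PySem.List.sorted (S ++ [key x]) (fun k : Int => k) true =
            PySem.List.insertBy (fun a b : Int => decide (b < a)) (key x) ks := by
          rw [hks, PySem.List.sorted_rev_eq_foldl_insertBy, PySem.List.sorted_rev_eq_foldl_insertBy,
            List.foldl_append]
          rfl
        rw [hadd, hsrt, if_neg hmem]
        exact (List.flatMap_congr (fun k _ => (hfil k).symm))

-- ===== VERDICT (by name: the statement is the Claim_ definition above) =====
theorem sort_components_by_its_size_spec : Claim_equal_sort_components_by_its_size := by
  intro compList _
  unfold Spec_sort_components_by_its_size sort_components_by_its_size sort_components_by_its_size_alt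
  simp only []
  -- rewrite A's three phases into the bucket decomposition
  set key : List Int → Int := fun comp => PySem.List.len comp with hkey
  have hfold : compList.foldl
      (fun d comp => d.modify (PySem.List.len comp) [] (fun v => v ++ [comp])) PySem.Dict.empty =
      (compList.map (fun c => (key c, c))).foldl
      (fun d p => d.modify p.1 [] (fun v => v ++ [p.2])) PySem.Dict.empty := by
    rw [List.foldl_map]
  have hkeys : (compList.foldl
      (fun d comp => d.modify (PySem.List.len comp) [] (fun v => v ++ [comp]))
      PySem.Dict.empty).keys = PySem.Set.ofList (compList.map key) := by
    rw [PySem.Dict.keys_foldl_modify_key compList key [] (fun _ comp v => v ++ [comp])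
      PySem.Dict.empty]
    rw [PySem.Set.ofList_eq_foldl]
    rfl
  have hgetD : ∀ k : Int, (compList.foldl
      (fun d comp => d.modify (PySem.List.len comp) [] (fun v => v ++ [comp]))
      PySem.Dict.empty).getD k [] = compList.filter (fun c => key c == k) := by
    intro k
    rw [hfold, PySem.Dict.getD_foldl_modify_append]
    simp [List.filter_map, Function.comp_def]
  simp only [hgetD, hkeys]
  rw [PySem.List.foldl_append_eq_flatMap, bucket_sorted key compList]
  simp
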